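-- pv_equiv track=rewrite | github.com/BialySztorm/AoC2024 | utils/data_manager.py | split_array_at_empty
-- ===== SOURCE A (Python) =====
-- def split_array_at_empty(data):
--     result = []
--     current = []
--     for item in data:
--         if item == '':
--             if current:
--                 result.append(current)
--                 current = []
--         else:
--             current.append(item)
--     if current:
--         result.append(current)
--     return result
-- ===== SOURCE B (Python) =====
-- def split_array_at_empty(data):
--     # No pending buffer and no trailing flush: grow the result in place,
--     # opening a new group directly in `result` whenever a non-empty item
--     # follows a separator (or the start); separators only set the flag.
--     result = []
--     prev_sep = True
--     for item in data:
--         if item == '':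
--             prev_sep = True
--         else:
--             if prev_sep:
--                 result.append([])
--                 prev_sep = False
--             result[-1].append(item)
--     return result
-- ===== Notes on version B (the rewrite author's own statement) =====
-- stated objective: alternative
-- what changed: B keeps no pending `current` buffer and needs no flush-on-separator or final flush: it appends items directly into the last group of the result, opening a new group in place whenever a non-empty item follows a separator boundary (tracked by a flag).
import Mathlib
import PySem

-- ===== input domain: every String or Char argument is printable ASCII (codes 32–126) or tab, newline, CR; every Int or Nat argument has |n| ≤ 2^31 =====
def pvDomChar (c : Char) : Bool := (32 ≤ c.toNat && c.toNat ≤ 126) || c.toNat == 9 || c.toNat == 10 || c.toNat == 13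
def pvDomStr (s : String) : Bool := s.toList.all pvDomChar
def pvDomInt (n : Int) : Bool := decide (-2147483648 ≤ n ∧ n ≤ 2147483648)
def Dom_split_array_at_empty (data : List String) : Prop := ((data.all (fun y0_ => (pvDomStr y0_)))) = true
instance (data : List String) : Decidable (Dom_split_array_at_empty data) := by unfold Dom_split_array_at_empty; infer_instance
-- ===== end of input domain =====

-- B grows the result in place guided by a boundary flag (no pending buffer, no flush); alternative decomposition, same cost.

-- ===== PORT A =====
-- forward loop over data with state (result, current); flush current on each separator ('if current:') and once more at the end
def pvStepA (s : List (List String) × List String) (item : String) : List (List String) × List String :=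
  if item = "" then
    (if s.2.isEmpty then s else (s.1 ++ [s.2], []))
  else
    (s.1, s.2 ++ [item])

def split_array_at_empty (data : List String) : List (List String) :=
  let s := data.foldl pvStepA ([], [])
  if s.2.isEmpty then s.1 else s.1 ++ [s.2]

-- ===== PORT B =====
-- forward loop with state (result, prev_sep); separators set the flag, a non-empty item after a boundary opens a new group in place
def pvStepB (s : List (List String) × Bool) (item : String) : List (List String) × Bool :=
  if item = "" then
    (s.1, true)
  else
    let r := if s.2 then s.1 ++ [[]] else s.1
    -- result[-1].append(item): r is nonempty here (the flag just ensured it), so getLastD is exact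
    (r.dropLast ++ [r.getLastD [] ++ [item]], false)

def split_array_at_empty_alt (data : List String) : List (List String) :=
  (data.foldl pvStepB ([], true)).1

-- ===== PRECONDITION & SPEC =====
def Spec_split_array_at_empty (data : List String) (out : List (List String)) : Prop := out = split_array_at_empty_alt data
instance (data : List String) (out : List (List String)) : Decidable (Spec_split_array_at_empty data out) := by unfold Spec_split_array_at_empty; infer_instance

-- ===== CLAIM (what is proved, stated in full; the proofs are below) =====
def Claim_equal_split_array_at_empty : Prop := ∀ (data : List String), Dom_split_array_at_empty data → Spec_split_array_at_empty data (split_array_at_empty data)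

-- ===== LEMMAS AND PROOFS =====

-- link between A's state (res, cur) and B's state (bres, flag):
-- empty pending buffer ↔ flag up and equal results; non-empty buffer ↔ flag down and buffer already sitting as the last group
lemma pvLoop_eq (data : List String) (res bres : List (List String)) (cur : List String) (flag : Bool)
    (hlink : (cur = [] ∧ flag = true ∧ bres = res) ∨ (cur ≠ [] ∧ flag = false ∧ bres = res ++ [cur])) :
    (data.foldl pvStepB (bres, flag)).1 =
    (let s := data.foldl pvStepA (res, cur)
      if s.2.isEmpty then s.1 else s.1 ++ [s.2]) := by
  induction data generalizing res bres cur flag with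
  | nil =>
    rcases hlink with ⟨rfl, _, hb⟩ | ⟨hc, _, hb⟩
    · rw [hb]; simp
    · rw [hb]
      cases cur with
      | nil => exact absurd rfl hc
      | cons a l => simp
  | cons x xs ih =>
    rw [List.foldl_cons, List.foldl_cons]
    by_cases hx : x = ""
    · subst hx
      rcases hlink with ⟨rfl, rfl, hb⟩ | ⟨hc, rfl, hb⟩
      · rw [hb]
        have ha : pvStepA (res, ([] : List String)) "" = (res, []) := by simp [pvStepA]
        have hbv : pvStepB (res, true) "" = (res, true) := by simp [pvStepB]
        rw [ha, hbv]
        exact ih res res [] true (Or.inl ⟨rfl, rfl, rfl⟩)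
      · rw [hb]
        have hce : cur.isEmpty = false := by cases cur <;> simp_all
        have ha : pvStepA (res, cur) "" = (res ++ [cur], []) := by simp [pvStepA, hce]
        have hbv : pvStepB (res ++ [cur], false) "" = (res ++ [cur], true) := by simp [pvStepB]
        rw [ha, hbv]
        exact ih (res ++ [cur]) (res ++ [cur]) [] true (Or.inl ⟨rfl, rfl, rfl⟩)
    · have ha : pvStepA (res, cur) x = (res, cur ++ [x]) := by simp [pvStepA, hx]
      rcases hlink with ⟨rfl, rfl, hb⟩ | ⟨hc, rfl, hb⟩
      · rw [hb]
        have hbv : pvStepB (res, true) x = (res ++ [[x]], false) := by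
          simp [pvStepB, hx]
        rw [ha, hbv]
        exact ih res (res ++ [[x]]) [x] false (Or.inr ⟨by simp, rfl, rfl⟩)
      · rw [hb]
        have hbv : pvStepB (res ++ [cur], false) x = (res ++ [cur ++ [x]], false) := by
          simp [pvStepB, hx]
        rw [ha, hbv]
        exact ih res (res ++ [cur ++ [x]]) (cur ++ [x]) false (Or.inr ⟨by simp, rfl, rfl⟩)

-- ===== VERDICT (by name: the statement is the Claim_ definition above) =====
theorem split_array_at_empty_spec : Claim_equal_split_array_at_empty := by
  intro data _
  show split_array_at_empty data = split_array_at_empty_alt data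
  have h := pvLoop_eq data [] [] [] true (Or.inl ⟨rfl, rfl, rfl⟩)
  simpa [split_array_at_empty, split_array_at_empty_alt] using h.symm
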